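-- pv_equiv track=rewrite | github.com/Adefioye/DSA_ZTM_QUESTIONS | 2DArrays/DFS-2DArray.py | find_dfs
-- ===== SOURCE A (Python) =====
-- def find_dfs(matrix):
--   row_size = len(matrix)
--   col_size = len(matrix[0])
--   visited = set()
--   result = []
--   dirs = [(-1, 0), (0, 1), (1, 0), [0, -1]]
--
--   def dfs(row, col, visited):
--     visited.add((row, col))
--     result.append(matrix[row][col])
--
--     for dir in dirs:
--       r = row + dir[0]
--       c = col + dir[1]
--
--       if r < 0 or r >= row_size or c < 0 or c >= col_size or (r, c) in visited:
--         continue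
--
--       dfs(r, c, visited)
--
--   dfs(0, 0, visited)
--   return result
-- ===== SOURCE B (Python) =====
-- def find_dfs(matrix):
--   # Iterative pre-order DFS: an explicit stack of (row, col, next-dir-index)
--   # frames replaces A's recursion; identical visit order.
--   row_size = len(matrix)
--   col_size = len(matrix[0])
--   dirs = ((-1, 0), (0, 1), (1, 0), (0, -1))
--   visited = {(0, 0)}
--   result = [matrix[0][0]]
--   stack = [(0, 0, 0)]
--   while stack:
--     r, c, i = stack[-1]
--     while i < 4:
--       nr = r + dirs[i][0]
--       nc = c + dirs[i][1]
--       if 0 <= nr < row_size and 0 <= nc < col_size and (nr, nc) not in visited: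
--         break
--       i += 1
--     if i == 4:
--       stack.pop()
--     else:
--       stack[-1] = (r, c, i + 1)
--       visited.add((nr, nc))
--       result.append(matrix[nr][nc])
--       stack.append((nr, nc, 0))
--   return result
-- ===== Notes on version B (the rewrite author's own statement) =====
-- stated objective: alternative
-- what changed: Replaces the recursive dfs helper with an iterative explicit-stack simulation: frames (row, col, next-dir-index) are resumed, advanced past exhausted directions, and popped, producing the identical pre-order traversal without recursion.
import Mathlib
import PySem

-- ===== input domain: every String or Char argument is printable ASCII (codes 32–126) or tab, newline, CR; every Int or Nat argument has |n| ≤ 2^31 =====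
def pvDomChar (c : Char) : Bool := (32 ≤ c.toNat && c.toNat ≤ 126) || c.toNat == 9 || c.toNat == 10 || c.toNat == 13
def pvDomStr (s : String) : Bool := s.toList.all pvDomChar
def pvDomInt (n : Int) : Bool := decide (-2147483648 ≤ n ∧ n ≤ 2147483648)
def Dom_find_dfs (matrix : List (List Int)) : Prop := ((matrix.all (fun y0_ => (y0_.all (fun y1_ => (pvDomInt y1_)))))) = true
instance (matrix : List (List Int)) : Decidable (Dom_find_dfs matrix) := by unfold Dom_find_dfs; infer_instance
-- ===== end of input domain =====

-- B replaces A's recursive DFS helper with an iterative explicit-stack simulation; identical pre-order traversal.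

-- ===== PORT A =====

-- the fixed direction list [(-1,0),(0,1),(1,0),(0,-1)] (A's last entry is a Python
-- list, but it is only ever read by index, identically to a tuple)
def dfsDirs : List (Int × Int) := [(-1, 0), (0, 1), (1, 0), (0, -1)]

-- matrix[r][c]; in every use both ports make, the indices are in range (Pre_ rules
-- out the IndexError of matrix[0][0] / short rows), so the defaults are never taken
def mval (matrix : List (List Int)) (r c : Int) : Int :=
  (PySem.List.pyGet? ((PySem.List.pyGet? matrix r).getD []) c).getD 0

-- A's recursive dfs, fuelled (Lean needs a decreasing argument; each nested call
-- strictly enlarges visited, so fuel = rows*cols + 1 is never exhausted).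
-- dfsA = the body of dfs(row, col, visited); loopA = its 'for dir in dirs' loop.
mutual
def dfsA (rows cols : Int) (matrix : List (List Int)) :
    Nat → Int → Int → List (Int × Int) → List Int → (List (Int × Int) × List Int)
  | 0, _, _, v, res => (v, res)
  | f + 1, row, col, v, res =>
      loopA rows cols matrix f dfsDirs row col (List.insert (row, col) v) (res ++ [mval matrix row col])
termination_by f => (f, 0)

def loopA (rows cols : Int) (matrix : List (List Int)) :
    Nat → List (Int × Int) → Int → Int → List (Int × Int) → List Int → (List (Int × Int) × List Int)
  | _, [], _, _, v, res => (v, res)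
  | f, d :: ds, row, col, v, res =>
      let r := row + d.1
      let c := col + d.2
      if r < 0 ∨ r ≥ rows ∨ c < 0 ∨ c ≥ cols ∨ (r, c) ∈ v then
        loopA rows cols matrix f ds row col v res
      else
        let s := dfsA rows cols matrix f r c v res
        loopA rows cols matrix f ds row col s.1 s.2
termination_by f ds => (f, ds.length + 1)
end

def find_dfs (matrix : List (List Int)) : List Int :=
  let rows : Int := matrix.length
  let cols : Int := ((PySem.List.pyGet? matrix 0).getD []).length
  (dfsA rows cols matrix (matrix.length * ((PySem.List.pyGet? matrix 0).getD []).length + 1) 0 0 [] []).2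

-- ===== PORT B =====

-- the cells of the grid, and the count of not-yet-visited cells (B's termination measure)
def gridCells (rows cols : Int) : List (Int × Int) :=
  (List.range rows.toNat).flatMap
    (fun (a : Nat) => (List.range cols.toNat).map (fun (b : Nat) => ((a : Int), (b : Int))))

def unvis (rows cols : Int) (v : List (Int × Int)) : Nat :=
  (gridCells rows cols).countP (fun q => decide (q ∉ v))

-- Source B's inner 'while i < 4' scan: first direction index ≥ i whose neighbour is
-- in bounds and unvisited, together with that neighbour
def findDirB (rows cols : Int) (v : List (Int × Int)) (r c : Int) (i : Nat) :
    Option (Nat × Int × Int) :=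
  if i < 4 then
    let d := dfsDirs.getD i (0, 0)
    let nr := r + d.1
    let nc := c + d.2
    if 0 ≤ nr ∧ nr < rows ∧ 0 ≤ nc ∧ nc < cols ∧ (nr, nc) ∉ v then some (i, nr, nc)
    else findDirB rows cols v r c (i + 1)
  else none
termination_by 4 - i

-- facts the while-loop of runB needs for its termination measure (cited by runB's decreasing_by)
theorem mem_gridCells (rows cols : Int) (p : Int × Int) :
    p ∈ gridCells rows cols ↔ 0 ≤ p.1 ∧ p.1 < rows ∧ 0 ≤ p.2 ∧ p.2 < cols := by
  obtain ⟨x, y⟩ := p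
  constructor
  · intro h
    obtain ⟨a, ha, hx⟩ := List.mem_flatMap.mp h
    obtain ⟨b, hb, he⟩ := List.mem_map.mp hx
    rw [List.mem_range] at ha hb
    rw [Prod.mk.injEq] at he
    obtain ⟨h1, h2⟩ := he
    subst h1; subst h2
    refine ⟨by omega, by omega, by omega, by omega⟩
  · rintro ⟨hx0, hxr, hy0, hyc⟩
    apply List.mem_flatMap.mpr
    refine ⟨x.toNat, List.mem_range.mpr (by omega), ?_⟩
    apply List.mem_map.mpr
    refine ⟨y.toNat, List.mem_range.mpr (by omega), ?_⟩
    rw [Prod.mk.injEq]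
    constructor <;> omega

theorem countP_insert_lt {l v : List (Int × Int)} {p : Int × Int}
    (hp : p ∈ l) (hv : p ∉ v) :
    l.countP (fun q => decide (q ∉ List.insert p v)) < l.countP (fun q => decide (q ∉ v)) := by
  induction l with
  | nil => cases hp
  | cons x xs ih =>
    simp only [List.countP_cons]
    have hmono : xs.countP (fun q => decide (q ∉ List.insert p v)) ≤
        xs.countP (fun q => decide (q ∉ v)) := by
      apply List.countP_mono_left
      intro a _ h
      simp only [decide_eq_true_eq, List.mem_insert_iff] at *
      exact fun hav => h (Or.inr hav)
    by_cases hxp : x = p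
    · subst hxp
      have h1 : decide ((x : Int × Int) ∉ List.insert x v) = false := by
        simp [List.mem_insert_iff]
      have h2 : decide ((x : Int × Int) ∉ v) = true := by simp [hv]
      have h3 : (if false = true then 1 else 0) = 0 := by simp
      simp only [h1, h2, h3, reduceIte]
      omega
    · have hx : p ∈ xs := by
        rcases List.mem_cons.mp hp with h | h
        · exact absurd h.symm hxp
        · exact h
      have he : decide ((x : Int × Int) ∉ List.insert p v) = decide (x ∉ v) := by
        simp [List.mem_insert_iff, hxp]
      rw [he]
      have := ih hx
      omega

theorem findDirB_some {rows cols : Int} {v : List (Int × Int)} {r c : Int} {i j : Nat}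
    {nr nc : Int} (h : findDirB rows cols v r c i = some (j, nr, nc)) :
    i ≤ j ∧ j < 4 ∧
    nr = r + (dfsDirs.getD j (0, 0)).1 ∧ nc = c + (dfsDirs.getD j (0, 0)).2 ∧
    (0 ≤ nr ∧ nr < rows ∧ 0 ≤ nc ∧ nc < cols ∧ (nr, nc) ∉ v) ∧
    (∀ k, i ≤ k → k < j →
      ¬ (0 ≤ r + (dfsDirs.getD k (0, 0)).1 ∧ r + (dfsDirs.getD k (0, 0)).1 < rows ∧
         0 ≤ c + (dfsDirs.getD k (0, 0)).2 ∧ c + (dfsDirs.getD k (0, 0)).2 < cols ∧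
         (r + (dfsDirs.getD k (0, 0)).1, c + (dfsDirs.getD k (0, 0)).2) ∉ v)) := by
  fun_induction findDirB rows cols v r c i with
  | case1 i hi d nr' nc' hok =>
    simp only [Option.some.injEq, Prod.mk.injEq] at h
    obtain ⟨h1, h2, h3⟩ := h
    subst h1; subst h2; subst h3
    exact ⟨le_refl _, hi, rfl, rfl, hok, fun k hk1 hk2 => absurd hk1 (by omega)⟩
  | case2 i hi d nr' nc' hok ih =>
    obtain ⟨ih1, ih2, ih3, ih4, ih5, ih6⟩ := ih h
    refine ⟨by omega, ih2, ih3, ih4, ih5, ?_⟩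
    intro k hk1 hk2
    rcases Nat.eq_or_lt_of_le hk1 with hk | hk
    · subst hk; exact hok
    · exact ih6 k hk hk2
  | case3 i hi => exact absurd h (by simp)

-- Source B's outer 'while stack' loop; each iteration either pushes a newly visited
-- cell (unvis drops) or pops a frame, so 6*unvis + |stack| decreases
def runB (rows cols : Int) (matrix : List (List Int)) :
    List (Int × Int × Nat) → List (Int × Int) → List Int → List Int
  | [], _, res => res
  | (r, c, i) :: rest, v, res =>
      match h : findDirB rows cols v r c i with
      | none => runB rows cols matrix rest v res
      | some (j, nr, nc) =>
          runB rows cols matrix ((nr, nc, 0) :: (r, c, j + 1) :: rest)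
            (List.insert (nr, nc) v) (res ++ [mval matrix nr nc])
termination_by stack v _ => 6 * unvis rows cols v + stack.length
decreasing_by
  · simp only [List.length_cons]; omega
  · obtain ⟨_, _, _, _, hok, _⟩ := findDirB_some h
    have hmem : (nr, nc) ∈ gridCells rows cols := by
      rw [mem_gridCells]; exact ⟨hok.1, hok.2.1, hok.2.2.1, hok.2.2.2.1⟩
    have := countP_insert_lt hmem hok.2.2.2.2
    simp only [unvis, List.length_cons]
    omega

def find_dfs_alt (matrix : List (List Int)) : List Int :=
  let rows : Int := matrix.length
  let cols : Int := ((PySem.List.pyGet? matrix 0).getD []).length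
  runB rows cols matrix [(0, 0, 0)] [(0, 0)] [mval matrix 0 0]

-- ===== PRECONDITION & SPEC =====
-- Exactly where the Python A returns: a nonempty matrix with a nonempty first row and
-- no row shorter than the first (DFS from (0,0) reaches every cell of the
-- rows × len(matrix[0]) grid, so any shorter row gives an IndexError).
def Pre_find_dfs (matrix : List (List Int)) : Prop :=
  matrix ≠ [] ∧ matrix.headD [] ≠ [] ∧ ∀ row ∈ matrix, (matrix.headD []).length ≤ row.length
instance (matrix : List (List Int)) : Decidable (Pre_find_dfs matrix) := by
  unfold Pre_find_dfs; infer_instance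
def pvWitness_find_dfs : List (List Int) := [[1, 2], [3, 4]]

def Spec_find_dfs (matrix : List (List Int)) (out : List Int) : Prop := out = find_dfs_alt matrix
instance (matrix : List (List Int)) (out : List Int) : Decidable (Spec_find_dfs matrix out) := by unfold Spec_find_dfs; infer_instance

-- ===== CLAIM (what is proved, stated in full; the proofs are below) =====
def Claim_equal_find_dfs : Prop := ∀ (matrix : List (List Int)), Dom_find_dfs matrix → Pre_find_dfs matrix → Spec_find_dfs matrix (find_dfs matrix)

-- ===== LEMMAS AND PROOFS =====

theorem findDirB_none {rows cols : Int} {v : List (Int × Int)} {r c : Int} {i : Nat}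
    (h : findDirB rows cols v r c i = none) :
    ∀ k, i ≤ k → k < 4 →
      ¬ (0 ≤ r + (dfsDirs.getD k (0, 0)).1 ∧ r + (dfsDirs.getD k (0, 0)).1 < rows ∧
         0 ≤ c + (dfsDirs.getD k (0, 0)).2 ∧ c + (dfsDirs.getD k (0, 0)).2 < cols ∧
         (r + (dfsDirs.getD k (0, 0)).1, c + (dfsDirs.getD k (0, 0)).2) ∉ v) := by
  fun_induction findDirB rows cols v r c i with
  | case1 i hi d nr' nc' hok => simp at h
  | case2 i hi d nr' nc' hok ih =>
    intro k hk1 hk2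
    rcases Nat.eq_or_lt_of_le hk1 with hke | hke
    · subst hke; exact hok
    · exact ih h k hke hk2
  | case3 i hi => intro k hk1 hk2; omega

-- A's continue-guard is the negation of B's success test
theorem guard_iff (rows cols nr nc : Int) (v : List (Int × Int)) :
    (nr < 0 ∨ nr ≥ rows ∨ nc < 0 ∨ nc ≥ cols ∨ (nr, nc) ∈ v) ↔
    ¬(0 ≤ nr ∧ nr < rows ∧ 0 ≤ nc ∧ nc < cols ∧ (nr, nc) ∉ v) := by
  constructor
  · rintro (h | h | h | h | h) ⟨a, b, c, d, e⟩ <;> first | omega | exact e h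
  · intro h
    by_cases a : nr < 0
    · exact Or.inl a
    by_cases b : nr ≥ rows
    · exact Or.inr (Or.inl b)
    by_cases c : nc < 0
    · exact Or.inr (Or.inr (Or.inl c))
    by_cases d : nc ≥ cols
    · exact Or.inr (Or.inr (Or.inr (Or.inl d)))
    by_cases e : (nr, nc) ∈ v
    · exact Or.inr (Or.inr (Or.inr (Or.inr e)))
    exact absurd ⟨by omega, by omega, by omega, by omega, e⟩ h

-- visited only grows (both phases of A's recursion)
theorem dfsA_mono (rows cols : Int) (matrix : List (List Int)) : ∀ (f : Nat),
    (∀ r c v res, v ⊆ (dfsA rows cols matrix f r c v res).1) ∧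
    (∀ ds row col v res, v ⊆ (loopA rows cols matrix f ds row col v res).1) := by
  intro f
  induction f with
  | zero =>
    constructor
    · intro r c v res
      rw [dfsA]
      exact List.Subset.refl v
    · intro ds
      induction ds with
      | nil =>
        intro row col v res
        rw [loopA]
        exact List.Subset.refl v
      | cons d ds ih =>
        intro row col v res
        rw [loopA]
        split
        · exact ih row col v res
        · have hd : dfsA rows cols matrix 0 (row + d.1) (col + d.2) v res = (v, res) := by
            rw [dfsA]
          rw [hd]
          exact ih row col v res
  | succ f ihf =>
    have hA : ∀ r c v res, v ⊆ (dfsA rows cols matrix (f + 1) r c v res).1 := by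
      intro r c v res
      rw [dfsA]
      exact List.Subset.trans (fun x hx => List.mem_insert_of_mem hx)
        (ihf.2 dfsDirs r c (List.insert (r, c) v) (res ++ [mval matrix r c]))
    refine ⟨hA, ?_⟩
    intro ds
    induction ds with
    | nil =>
      intro row col v res
      rw [loopA]
      exact List.Subset.refl v
    | cons d ds ih =>
      intro row col v res
      rw [loopA]
      split
      · exact ih row col v res
      · exact List.Subset.trans (hA _ _ _ _) (ih _ _ _ _)

-- visited grows ⇒ the unvisited count shrinks
theorem unvis_mono {rows cols : Int} {v w : List (Int × Int)} (h : v ⊆ w) :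
    unvis rows cols w ≤ unvis rows cols v := by
  apply List.countP_mono_left
  intro a _ ha
  simp only [decide_eq_true_eq] at *
  exact fun hav => ha (h hav)

-- skipping failing directions: A's dir-loop from index i equals it from index j
theorem loopA_skip (rows cols : Int) (matrix : List (List Int)) (f : Nat) (row col : Int) :
    ∀ (n i j : Nat) (v : List (Int × Int)) (res : List Int), i + n = j → j ≤ 4 →
    (∀ k, i ≤ k → k < j →
      ¬ (0 ≤ row + (dfsDirs.getD k (0, 0)).1 ∧ row + (dfsDirs.getD k (0, 0)).1 < rows ∧
         0 ≤ col + (dfsDirs.getD k (0, 0)).2 ∧ col + (dfsDirs.getD k (0, 0)).2 < cols ∧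
         (row + (dfsDirs.getD k (0, 0)).1, col + (dfsDirs.getD k (0, 0)).2) ∉ v)) →
    loopA rows cols matrix f (dfsDirs.drop i) row col v res =
      loopA rows cols matrix f (dfsDirs.drop j) row col v res := by
  intro n
  induction n with
  | zero =>
    intro i j v res hij _ _
    rw [show i = j by omega]
  | succ n ihn =>
    intro i j v res hij hj4 hfail
    have hi4 : i < dfsDirs.length := by simp [dfsDirs]; omega
    rw [List.drop_eq_getElem_cons hi4, loopA]
    have hfi := hfail i (le_refl i) (by omega)
    rw [List.getD_eq_getElem _ _ hi4] at hfi
    rw [if_pos ((guard_iff rows cols _ _ v).mpr hfi)]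
    exact ihn (i + 1) j v res (by omega) hj4 (fun k hk1 hk2 => hfail k (by omega) hk2)

-- the key correspondence: resuming frame (r,c,i) on B's stack computes exactly
-- A's dir-loop from index i, then continues with the rest of the stack
theorem key (rows cols : Int) (matrix : List (List Int)) : ∀ (n : Nat)
    (v : List (Int × Int)) (f : Nat) (r c : Int) (i : Nat)
    (rest : List (Int × Int × Nat)) (res : List Int),
    unvis rows cols v ≤ n → unvis rows cols v ≤ f → (r, c) ∈ v →
    runB rows cols matrix ((r, c, i) :: rest) v res =
      runB rows cols matrix rest
        (loopA rows cols matrix f (dfsDirs.drop i) r c v res).1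
        (loopA rows cols matrix f (dfsDirs.drop i) r c v res).2 := by
  intro n
  induction n with
  | zero =>
    intro v f r c i rest res hn hf hv
    rw [runB]
    split
    · rename_i heq
      have hend : loopA rows cols matrix f (dfsDirs.drop i) r c v res = (v, res) := by
        rcases Nat.le_total i 4 with h | h
        · rw [loopA_skip rows cols matrix f r c (4 - i) i 4 v res (by omega) (le_refl 4)
            (fun k hk1 hk2 => findDirB_none heq k hk1 hk2)]
          rw [show List.drop 4 dfsDirs = [] from rfl, loopA]
        · rw [List.drop_eq_nil_of_le (by simp [dfsDirs]; omega), loopA]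
      rw [hend]
    · rename_i j nr nc heq
      obtain ⟨_, _, _, _, hok, _⟩ := findDirB_some heq
      have hmem : (nr, nc) ∈ gridCells rows cols := by
        rw [mem_gridCells]
        exact ⟨hok.1, hok.2.1, hok.2.2.1, hok.2.2.2.1⟩
      have := countP_insert_lt hmem hok.2.2.2.2
      exact absurd hn (by unfold unvis at *; omega)
  | succ n ihn =>
    intro v f r c i rest res hn hf hv
    rw [runB]
    split
    · rename_i heq
      have hend : loopA rows cols matrix f (dfsDirs.drop i) r c v res = (v, res) := by
        rcases Nat.le_total i 4 with h | h
        · rw [loopA_skip rows cols matrix f r c (4 - i) i 4 v res (by omega) (le_refl 4)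
            (fun k hk1 hk2 => findDirB_none heq k hk1 hk2)]
          rw [show List.drop 4 dfsDirs = [] from rfl, loopA]
        · rw [List.drop_eq_nil_of_le (by simp [dfsDirs]; omega), loopA]
      rw [hend]
    · rename_i j nr nc heq
      obtain ⟨hij, hj4, hnr, hnc, hok, hfails⟩ := findDirB_some heq
      have hmem : (nr, nc) ∈ gridCells rows cols := by
        rw [mem_gridCells]
        exact ⟨hok.1, hok.2.1, hok.2.2.1, hok.2.2.2.1⟩
      have hlt : unvis rows cols (List.insert (nr, nc) v) < unvis rows cols v :=
        countP_insert_lt hmem hok.2.2.2.2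
      obtain ⟨f', rfl⟩ : ∃ f', f = f' + 1 := ⟨f - 1, by omega⟩
      set v1 := List.insert (nr, nc) v with hv1
      set res1 := res ++ [mval matrix nr nc] with hres1
      -- the pushed frame computes dfsA on (nr, nc)
      have happ1 := ihn v1 f' nr nc 0 ((r, c, j + 1) :: rest) res1
        (by omega) (by omega) List.mem_insert_self
      rw [List.drop_zero] at happ1
      rw [happ1]
      set s1 := loopA rows cols matrix f' dfsDirs nr nc v1 res1 with hs1
      have hsub : v1 ⊆ s1.1 := by
        rw [hs1]
        exact (dfsA_mono rows cols matrix f').2 _ _ _ _ _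
      have huns1 : unvis rows cols s1.1 ≤ unvis rows cols v1 := unvis_mono hsub
      -- the resumed frame continues the loop from index j+1
      have happ2 := ihn s1.1 (f' + 1) r c (j + 1) rest s1.2
        (by omega) (by omega) (hsub (List.mem_insert_of_mem hv))
      rw [happ2]
      -- identify the right-hand sides: skip i..j-1, take the step at j
      have hskip := loopA_skip rows cols matrix (f' + 1) r c (j - i) i j v res
        (by omega) (by omega) (fun k hk1 hk2 => hfails k hk1 hk2)
      have hj4' : j < dfsDirs.length := by simp [dfsDirs]; omega
      have hstep : loopA rows cols matrix (f' + 1) (dfsDirs.drop j) r c v res =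
          loopA rows cols matrix (f' + 1) (dfsDirs.drop (j + 1)) r c s1.1 s1.2 := by
        rw [List.drop_eq_getElem_cons hj4', loopA]
        rw [List.getD_eq_getElem _ _ hj4'] at hnr hnc
        rw [if_neg (fun hg => ((guard_iff rows cols _ _ v).mp hg)
          (by rw [← hnr, ← hnc]; exact hok))]
        have hd : dfsA rows cols matrix (f' + 1) (r + dfsDirs[j].1) (c + dfsDirs[j].2) v res = s1 := by
          rw [dfsA, hs1, hv1, hres1, hnr, hnc]
        rw [hd]
      rw [hskip, hstep]

theorem find_dfs_eq (matrix : List (List Int)) : find_dfs matrix = find_dfs_alt matrix := by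
  show (dfsA (matrix.length : Int) (((PySem.List.pyGet? matrix 0).getD []).length : Int) matrix
      (matrix.length * ((PySem.List.pyGet? matrix 0).getD []).length + 1) 0 0 [] []).2 =
    runB (matrix.length : Int) (((PySem.List.pyGet? matrix 0).getD []).length : Int) matrix
      [((0 : Int), (0 : Int), (0 : Nat))] [((0 : Int), (0 : Int))] [mval matrix 0 0]
  set rows : Int := (matrix.length : Int) with hrows
  set cols : Int := (((PySem.List.pyGet? matrix 0).getD []).length : Int) with hcols
  set N : Nat := matrix.length * ((PySem.List.pyGet? matrix 0).getD []).length with hNdef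
  have hlen : (gridCells rows cols).length = N := by
    simp [gridCells, List.length_flatMap, hrows, hcols, hNdef,
      List.map_const', List.sum_replicate]
  have hN : unvis rows cols [((0 : Int), (0 : Int))] ≤ N := by
    rw [← hlen]
    exact List.countP_le_length
  have h1 : dfsA rows cols matrix (N + 1) 0 0 [] [] =
      loopA rows cols matrix N dfsDirs 0 0 [((0 : Int), (0 : Int))] [mval matrix 0 0] := by
    rw [dfsA]
    rfl
  have hkey := key rows cols matrix (unvis rows cols [((0 : Int), (0 : Int))])
    [((0 : Int), (0 : Int))] N 0 0 0 [] [mval matrix 0 0] (le_refl _) hN (by simp)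
  rw [List.drop_zero] at hkey
  rw [h1, hkey, runB]

-- ===== VERDICT (by name: the statement is the Claim_ definition above) =====
theorem find_dfs_spec : Claim_equal_find_dfs := by
  intro matrix _ _
  unfold Spec_find_dfs
  exact find_dfs_eq matrix
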